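-- pv_equiv track=rewrite | github.com/BackofenLab/vaRRI | source/utils.py | listIntermolNodes
-- ===== SOURCE A (Python) =====
-- def listIntermolNodes(struc: str, shift: int = 0) -> list[tuple[int, str]]:
--     """Identify intermolecular basepair positions in a structure string.
--
--     Analyzes a dot-bracket structure (without pseudoknots) and returns
--     positions involved in intermolecular basepairs. Unmatched opening
--     or closing brackets are considered intermolecular.
--
--     Supports multiple bracket types independently: (), [], {}, <>.
--
--     Args:
--         struc (str): Structure string in dot-bracket notation.
--         shift (int, optional): Offset added to each index. Defaults to 0.
--
--     Returns:
--         list[tuple[int, str]]: Sorted list of (index, bracket) pairs,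
--         where index is 1-based and includes the applied shift.
--
--     For the following example Structures, the intermolecular basepairs are indicated with carets (^):s
--     eg (())...((...(())  and (())...))...(())
--     eg ((..(..)) and ((..)..))
--        ^                     ^
--
--     eg ((((...))... and ...))..
--        ^^                  ^^
--     eg ((<<...))... and ...>>..
--          ^^                ^^
--     """
--     inter_basepairs = []
--     open_basepairs = {"(": [], "<": [], "[": [], "{": []}
--     basepairs = [("(",")"), ("[","]"), ("{", "}"), ("<",">")]
--     for index, char in enumerate(struc, 1):
--         for (open, close) in basepairs:
--             # check for open basepair, add to stack
--             if char == open: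
--                 open_basepairs[open] += [(index+shift, char)]
--                 break
--             # check for close basepair, remove from stack
--             # if stack empty, it is an intermolecular basepair
--             if char == close:
--                 if open_basepairs[open]:
--                     open_basepairs[open].pop()
--                 else:
--                     inter_basepairs += [(index+shift, char)]
--                 break
--
--     # all remaining open basepairs in the stack are intermolecular
--     for pairs in open_basepairs.values():
--         inter_basepairs += pairs
--
--     inter_basepairs.sort()
--     return inter_basepairs
-- ===== SOURCE B (Python) =====
-- def listIntermolNodes(struc: str, shift: int = 0) -> list[tuple[int, str]]:
--     """Match brackets per type recording matched indices in a set, then one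
--     filter pass over the string emits the unmatched bracket positions already
--     in ascending order (no collect-then-sort)."""
--     closer_of = {")": "(", "]": "[", "}": "{", ">": "<"}
--     opens = {"(": [], "[": [], "{": [], "<": []}
--     brackets = set(opens) | set(closer_of)
--     matched = set()
--     for i, ch in enumerate(struc, 1):
--         if ch in opens:
--             opens[ch].append(i)
--         elif ch in closer_of:
--             stack = opens[closer_of[ch]]
--             if stack:
--                 matched.add(stack.pop())
--                 matched.add(i)
--     return [(i + shift, ch) for i, ch in enumerate(struc, 1)
--             if ch in brackets and i not in matched]
-- ===== Notes on version B (the rewrite author's own statement) =====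
-- stated objective: alternative
-- what changed: A collects unmatched brackets into stacks of (index,char) pairs, appends leftover stack contents and sorts; B stack-matches indices only, records every matched open/close index in a set, and a second left-to-right pass emits unmatched bracket positions already in ascending order, eliminating the final sort.
import Mathlib
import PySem

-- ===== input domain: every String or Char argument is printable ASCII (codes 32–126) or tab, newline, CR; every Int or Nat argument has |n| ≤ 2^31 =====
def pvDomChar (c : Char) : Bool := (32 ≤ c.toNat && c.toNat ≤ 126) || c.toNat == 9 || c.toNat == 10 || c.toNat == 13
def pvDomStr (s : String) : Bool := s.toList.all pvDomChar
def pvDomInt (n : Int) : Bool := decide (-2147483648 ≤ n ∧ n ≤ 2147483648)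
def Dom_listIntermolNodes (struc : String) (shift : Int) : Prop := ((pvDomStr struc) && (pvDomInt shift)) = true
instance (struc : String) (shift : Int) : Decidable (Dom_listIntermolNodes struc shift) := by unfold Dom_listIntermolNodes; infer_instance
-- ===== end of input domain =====

-- B replaces A's collect-unmatched-brackets-then-sort with per-type index matching into a
-- matched set plus a second ascending filter pass, eliminating the final sort (alternative).


-- ===== PORT A =====
def pvBasepairsA : List (Char × Char) := [('(', ')'), ('[', ']'), ('{', '}'), ('<', '>')]

-- the inner `for (open, close) in basepairs:` loop with its two `break`s
def pvInnerA (shift index : Int) (ch : Char)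
    (st : List (Int × String) × PySem.Dict Char (List (Int × String))) :
    List (Char × Char) → List (Int × String) × PySem.Dict Char (List (Int × String))
  | [] => st
  | (o, c) :: rest =>
    if ch = o then
      -- open_basepairs[open] += [(index+shift, char)]  (the key is always present)
      (st.1, st.2.insert o (st.2.getD o [] ++ [(index + shift, String.ofList [ch])]))
    else if ch = c then
      if st.2.getD o [] ≠ [] then
        -- open_basepairs[open].pop()  removes the last element
        (st.1, st.2.insert o (st.2.getD o []).dropLast)
      else
        (st.1 ++ [(index + shift, String.ofList [ch])], st.2)
    else pvInnerA shift index ch st rest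

def listIntermolNodes (struc : String) (shift : Int) : List (Int × String) :=
  let init : PySem.Dict Char (List (Int × String)) := ⟨[('(', []), ('<', []), ('[', []), ('{', [])]⟩
  let fin := (PySem.List.enumerate struc.toList 1).foldl
    (fun st ic => pvInnerA shift ic.1 ic.2 st pvBasepairsA) ([], init)
  let inter := (PySem.Dict.values fin.2).foldl (fun acc pairs => acc ++ pairs) fin.1
  PySem.List.sorted2 inter (fun x => x.1) (fun x => x.2)

-- ===== PORT B =====
def pvCloserOf : PySem.Dict Char Char := ⟨[(')', '('), (']', '['), ('}', '{'), ('>', '<')]⟩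

def pvBrackets : PySem.Set Char := ['(', '[', '{', '<', ')', ']', '}', '>']

def pvStepB (st : PySem.Dict Char (List Int) × PySem.Set Int) (i : Int) (ch : Char) :
    PySem.Dict Char (List Int) × PySem.Set Int :=
  if (PySem.Dict.get? st.1 ch).isSome then          -- ch in opens
    (st.1.insert ch (st.1.getD ch [] ++ [i]), st.2)
  else
    match PySem.Dict.get? pvCloserOf ch with         -- ch in closer_of
    | some o =>
      let stack := st.1.getD o []
      match stack.getLast? with                      -- `if stack:` together with `stack.pop()`
      | some j => (st.1.insert o stack.dropLast, (st.2.add j).add i)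
      | none => st
    | none => st

def listIntermolNodes_alt (struc : String) (shift : Int) : List (Int × String) :=
  let opens0 : PySem.Dict Char (List Int) := ⟨[('(', []), ('[', []), ('{', []), ('<', [])]⟩
  let fin := (PySem.List.enumerate struc.toList 1).foldl
    (fun st ic => pvStepB st ic.1 ic.2) (opens0, PySem.Set.ofList [])
  (PySem.List.enumerate struc.toList 1).filterMap (fun ic =>
    if pvBrackets.contains ic.2 && !(fin.2.contains ic.1) then
      some (ic.1 + shift, String.ofList [ic.2])
    else none)

-- ===== PRECONDITION & SPEC =====
def Spec_listIntermolNodes (struc : String) (shift : Int) (out : List (Int × String)) : Prop := out = listIntermolNodes_alt struc shift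
instance (struc : String) (shift : Int) (out : List (Int × String)) : Decidable (Spec_listIntermolNodes struc shift out) := by unfold Spec_listIntermolNodes; infer_instance

-- ===== CLAIM (what is proved, stated in full; the proofs are below) =====
def Claim_equal_listIntermolNodes : Prop := ∀ (struc : String) (shift : Int), Dom_listIntermolNodes struc shift → Spec_listIntermolNodes struc shift (listIntermolNodes struc shift)

-- ===== LEMMAS AND PROOFS =====

-- reference state: the four stacks (positions only), emitted unmatched closers, matched set
structure PvSt where
  p : List Int
  l : List Int
  b : List Int
  a : List Int
  em : List (Int × Char)
  m : PySem.Set Int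

def pvStep (st : PvSt) (i : Int) (c : Char) : PvSt :=
  if c = '(' then { st with p := st.p ++ [i] }
  else if c = '[' then { st with l := st.l ++ [i] }
  else if c = '{' then { st with b := st.b ++ [i] }
  else if c = '<' then { st with a := st.a ++ [i] }
  else if c = ')' then
    match st.p.getLast? with
    | some j => { st with p := st.p.dropLast, m := (st.m.add j).add i }
    | none => { st with em := st.em ++ [(i, c)] }
  else if c = ']' then
    match st.l.getLast? with
    | some j => { st with l := st.l.dropLast, m := (st.m.add j).add i }
    | none => { st with em := st.em ++ [(i, c)] }
  else if c = '}' then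
    match st.b.getLast? with
    | some j => { st with b := st.b.dropLast, m := (st.m.add j).add i }
    | none => { st with em := st.em ++ [(i, c)] }
  else if c = '>' then
    match st.a.getLast? with
    | some j => { st with a := st.a.dropLast, m := (st.m.add j).add i }
    | none => { st with em := st.em ++ [(i, c)] }
  else st

def pvScan : List (Int × Char) → PvSt → PvSt
  | [], st => st
  | ic :: rest, st => pvScan rest (pvStep st ic.1 ic.2)

def pairsOf (st : PvSt) : List (Int × Char) :=
  st.em ++ st.p.map (fun i => (i, '(')) ++ st.a.map (fun i => (i, '<'))
    ++ st.l.map (fun i => (i, '[')) ++ st.b.map (fun i => (i, '{'))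

def pvF (shift : Int) (q : Int × Char) : Int × String := (q.1 + shift, String.ofList [q.2])

def pvRepA (shift : Int) (st : PvSt) :
    List (Int × String) × PySem.Dict Char (List (Int × String)) :=
  (st.em.map (pvF shift),
   ⟨[('(', st.p.map (fun i => (i + shift, String.ofList ['(']))),
     ('<', st.a.map (fun i => (i + shift, String.ofList ['<']))),
     ('[', st.l.map (fun i => (i + shift, String.ofList ['[']))),
     ('{', st.b.map (fun i => (i + shift, String.ofList ['{'])))]⟩)

def pvRepB (st : PvSt) : PySem.Dict Char (List Int) × PySem.Set Int :=
  (⟨[('(', st.p), ('[', st.l), ('{', st.b), ('<', st.a)]⟩, st.m)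

lemma pvStepA_rep (shift i : Int) (ch : Char) (st : PvSt) :
    pvInnerA shift i ch (pvRepA shift st) pvBasepairsA = pvRepA shift (pvStep st i ch) := by
  by_cases h1 : ch = '('
  · subst h1
    simp [pvInnerA, pvBasepairsA, pvStep, pvRepA, pvF, PySem.Dict.insert, PySem.Dict.getD,
      PySem.Dict.get?, PySem.Dict.contains]
  by_cases h2 : ch = '['
  · subst h2
    simp [pvInnerA, pvBasepairsA, pvStep, pvRepA, pvF, PySem.Dict.insert, PySem.Dict.getD,
      PySem.Dict.get?, PySem.Dict.contains]
  by_cases h3 : ch = '{'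
  · subst h3
    simp [pvInnerA, pvBasepairsA, pvStep, pvRepA, pvF, PySem.Dict.insert, PySem.Dict.getD,
      PySem.Dict.get?, PySem.Dict.contains]
  by_cases h4 : ch = '<'
  · subst h4
    simp [pvInnerA, pvBasepairsA, pvStep, pvRepA, pvF, PySem.Dict.insert, PySem.Dict.getD,
      PySem.Dict.get?, PySem.Dict.contains]
  by_cases h5 : ch = ')'
  · subst h5
    cases hp : st.p.getLast? with
    | none =>
      have hnil : st.p = [] := List.getLast?_eq_none_iff.mp hp
      simp [pvInnerA, pvBasepairsA, pvStep, pvRepA, pvF, hp, hnil, PySem.Dict.insert,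
        PySem.Dict.getD, PySem.Dict.get?, PySem.Dict.contains]
    | some j =>
      have hne : st.p ≠ [] := by intro h; simp [h] at hp
      simp [pvInnerA, pvBasepairsA, pvStep, pvRepA, pvF, hp, hne, PySem.Dict.insert,
        PySem.Dict.getD, PySem.Dict.get?, PySem.Dict.contains, List.map_dropLast]
  by_cases h6 : ch = ']'
  · subst h6
    cases hp : st.l.getLast? with
    | none =>
      have hnil : st.l = [] := List.getLast?_eq_none_iff.mp hp
      simp [pvInnerA, pvBasepairsA, pvStep, pvRepA, pvF, hp, hnil, PySem.Dict.insert,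
        PySem.Dict.getD, PySem.Dict.get?, PySem.Dict.contains]
    | some j =>
      have hne : st.l ≠ [] := by intro h; simp [h] at hp
      simp [pvInnerA, pvBasepairsA, pvStep, pvRepA, pvF, hp, hne, PySem.Dict.insert,
        PySem.Dict.getD, PySem.Dict.get?, PySem.Dict.contains, List.map_dropLast]
  by_cases h7 : ch = '}'
  · subst h7
    cases hp : st.b.getLast? with
    | none =>
      have hnil : st.b = [] := List.getLast?_eq_none_iff.mp hp
      simp [pvInnerA, pvBasepairsA, pvStep, pvRepA, pvF, hp, hnil, PySem.Dict.insert,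
        PySem.Dict.getD, PySem.Dict.get?, PySem.Dict.contains]
    | some j =>
      have hne : st.b ≠ [] := by intro h; simp [h] at hp
      simp [pvInnerA, pvBasepairsA, pvStep, pvRepA, pvF, hp, hne, PySem.Dict.insert,
        PySem.Dict.getD, PySem.Dict.get?, PySem.Dict.contains, List.map_dropLast]
  by_cases h8 : ch = '>'
  · subst h8
    cases hp : st.a.getLast? with
    | none =>
      have hnil : st.a = [] := List.getLast?_eq_none_iff.mp hp
      simp [pvInnerA, pvBasepairsA, pvStep, pvRepA, pvF, hp, hnil, PySem.Dict.insert,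
        PySem.Dict.getD, PySem.Dict.get?, PySem.Dict.contains]
    | some j =>
      have hne : st.a ≠ [] := by intro h; simp [h] at hp
      simp [pvInnerA, pvBasepairsA, pvStep, pvRepA, pvF, hp, hne, PySem.Dict.insert,
        PySem.Dict.getD, PySem.Dict.get?, PySem.Dict.contains, List.map_dropLast]
  simp [pvInnerA, pvBasepairsA, pvStep, h1, h2, h3, h4, h5, h6, h7, h8]

lemma pvFoldA_rep (shift : Int) (ps : List (Int × Char)) (st : PvSt) :
    ps.foldl (fun s ic => pvInnerA shift ic.1 ic.2 s pvBasepairsA) (pvRepA shift st)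
      = pvRepA shift (pvScan ps st) := by
  induction ps generalizing st with
  | nil => rfl
  | cons ic rest ih => simp [pvScan, List.foldl_cons, pvStepA_rep, ih]

lemma pvStepB_rep (i : Int) (ch : Char) (st : PvSt) :
    pvStepB (pvRepB st) i ch = pvRepB (pvStep st i ch) := by
  by_cases h1 : ch = '('
  · subst h1
    simp [pvStepB, pvCloserOf, pvStep, pvRepB, PySem.Dict.insert, PySem.Dict.getD,
      PySem.Dict.get?, PySem.Dict.contains]
  by_cases h2 : ch = '['
  · subst h2
    simp [pvStepB, pvCloserOf, pvStep, pvRepB, PySem.Dict.insert, PySem.Dict.getD,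
      PySem.Dict.get?, PySem.Dict.contains]
  by_cases h3 : ch = '{'
  · subst h3
    simp [pvStepB, pvCloserOf, pvStep, pvRepB, PySem.Dict.insert, PySem.Dict.getD,
      PySem.Dict.get?, PySem.Dict.contains]
  by_cases h4 : ch = '<'
  · subst h4
    simp [pvStepB, pvCloserOf, pvStep, pvRepB, PySem.Dict.insert, PySem.Dict.getD,
      PySem.Dict.get?, PySem.Dict.contains]
  by_cases h5 : ch = ')'
  · subst h5
    cases hp : st.p.getLast? with
    | none =>
      have hnil : st.p = [] := List.getLast?_eq_none_iff.mp hp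
      simp [pvStepB, pvCloserOf, pvStep, pvRepB, hp, hnil, PySem.Dict.insert,
        PySem.Dict.getD, PySem.Dict.get?, PySem.Dict.contains]
    | some j =>
      simp [pvStepB, pvCloserOf, pvStep, pvRepB, hp, PySem.Dict.insert,
        PySem.Dict.getD, PySem.Dict.get?, PySem.Dict.contains]
  by_cases h6 : ch = ']'
  · subst h6
    cases hp : st.l.getLast? with
    | none =>
      have hnil : st.l = [] := List.getLast?_eq_none_iff.mp hp
      simp [pvStepB, pvCloserOf, pvStep, pvRepB, hp, hnil, PySem.Dict.insert,
        PySem.Dict.getD, PySem.Dict.get?, PySem.Dict.contains]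
    | some j =>
      simp [pvStepB, pvCloserOf, pvStep, pvRepB, hp, PySem.Dict.insert,
        PySem.Dict.getD, PySem.Dict.get?, PySem.Dict.contains]
  by_cases h7 : ch = '}'
  · subst h7
    cases hp : st.b.getLast? with
    | none =>
      have hnil : st.b = [] := List.getLast?_eq_none_iff.mp hp
      simp [pvStepB, pvCloserOf, pvStep, pvRepB, hp, hnil, PySem.Dict.insert,
        PySem.Dict.getD, PySem.Dict.get?, PySem.Dict.contains]
    | some j =>
      simp [pvStepB, pvCloserOf, pvStep, pvRepB, hp, PySem.Dict.insert,
        PySem.Dict.getD, PySem.Dict.get?, PySem.Dict.contains]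
  by_cases h8 : ch = '>'
  · subst h8
    cases hp : st.a.getLast? with
    | none =>
      have hnil : st.a = [] := List.getLast?_eq_none_iff.mp hp
      simp [pvStepB, pvCloserOf, pvStep, pvRepB, hp, hnil, PySem.Dict.insert,
        PySem.Dict.getD, PySem.Dict.get?, PySem.Dict.contains]
    | some j =>
      simp [pvStepB, pvCloserOf, pvStep, pvRepB, hp, PySem.Dict.insert,
        PySem.Dict.getD, PySem.Dict.get?, PySem.Dict.contains]
  have g1 : ('(' : Char) ≠ ch := fun h => h1 h.symm
  have g2 : ('[' : Char) ≠ ch := fun h => h2 h.symm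
  have g3 : ('{' : Char) ≠ ch := fun h => h3 h.symm
  have g4 : ('<' : Char) ≠ ch := fun h => h4 h.symm
  have g5 : (')' : Char) ≠ ch := fun h => h5 h.symm
  have g6 : (']' : Char) ≠ ch := fun h => h6 h.symm
  have g7 : ('}' : Char) ≠ ch := fun h => h7 h.symm
  have g8 : ('>' : Char) ≠ ch := fun h => h8 h.symm
  have b1 : (('(' : Char) == ch) = false := by simp [g1]
  have b2 : (('[' : Char) == ch) = false := by simp [g2]
  have b3 : (('{' : Char) == ch) = false := by simp [g3]
  have b4 : (('<' : Char) == ch) = false := by simp [g4]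
  have b5 : ((')' : Char) == ch) = false := by simp [g5]
  have b6 : ((']' : Char) == ch) = false := by simp [g6]
  have b7 : (('}' : Char) == ch) = false := by simp [g7]
  have b8 : (('>' : Char) == ch) = false := by simp [g8]
  simp [pvStepB, pvCloserOf, pvStep, pvRepB, List.find?, h1, h2, h3, h4, h5,
    h6, h7, h8, b1, b2, b3, b4, b5, b6, b7, b8, PySem.Dict.get?]

lemma pvFoldB_rep (ps : List (Int × Char)) (st : PvSt) :
    ps.foldl (fun s ic => pvStepB s ic.1 ic.2) (pvRepB st) = pvRepB (pvScan ps st) := by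
  induction ps generalizing st with
  | nil => rfl
  | cons ic rest ih => simp [pvScan, List.foldl_cons, pvStepB_rep, ih]

def pvSt0 : PvSt := ⟨[], [], [], [], [], []⟩

def pvPos (st : PvSt) : List Int := (pairsOf st).map Prod.fst

def pvIsBr (c : Char) : Prop := c ∈ (['(', '[', '{', '<', ')', ']', '}', '>'] : List Char)


-- generic facts for a step that appends one fresh bracket pair (push or emit)
lemma pvCaseAdd (st st₁ : PvSt) (s : Int) (c : Char)
    (hperm : (pairsOf st₁).Perm ((s, c) :: pairsOf st))
    (hm : st₁.m = st.m) (hbr : pvIsBr c)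
    (hfr : ∀ x ∈ pvPos st, x < s) (hfrm : ∀ x ∈ st.m, x < s)
    (hnd : (pvPos st).Nodup) (hdj : ∀ x ∈ pvPos st, x ∉ st.m) :
    (∀ x ∈ pvPos st₁, x < s + 1) ∧ (∀ x ∈ st₁.m, x < s + 1) ∧ (pvPos st₁).Nodup
    ∧ (∀ x ∈ pvPos st₁, x ∉ st₁.m)
    ∧ (∀ q ∈ pairsOf st₁, q ∈ pairsOf st ∨ (q = (s, c) ∧ pvIsBr c))
    ∧ (∀ q ∈ pairsOf st, q ∈ pairsOf st₁ ∨ q.1 ∈ st₁.m)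
    ∧ (∀ x ∈ st.m, x ∈ st₁.m)
    ∧ ((s, c) ∈ pairsOf st₁ ∨ s ∈ st₁.m) := by
  have hpos : (pvPos st₁).Perm (s :: pvPos st) := by
    have := hperm.map Prod.fst
    simpa [pvPos] using this
  have hmem : ∀ x, x ∈ pvPos st₁ ↔ x = s ∨ x ∈ pvPos st := by
    intro x
    rw [hpos.mem_iff]; simp
  have hsn : s ∉ pvPos st := fun h => absurd (hfr s h) (by omega)
  refine ⟨?_, ?_, ?_, ?_, ?_, ?_, ?_, ?_⟩
  · intro x hx; rcases (hmem x).mp hx with h | h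
    · omega
    · have := hfr x h; omega
  · intro x hx; rw [hm] at hx; have := hfrm x hx; omega
  · rw [hpos.nodup_iff]; exact List.nodup_cons.mpr ⟨hsn, hnd⟩
  · intro x hx hxm
    rw [hm] at hxm
    rcases (hmem x).mp hx with h | h
    · subst h; have := hfrm x hxm; omega
    · exact hdj x h hxm
  · intro q hq
    rcases List.mem_cons.mp (hperm.mem_iff.mp hq) with h | h
    · exact Or.inr ⟨h, hbr⟩
    · exact Or.inl h
  · intro q hq; exact Or.inl (hperm.mem_iff.mpr (List.mem_cons.mpr (Or.inr hq)))
  · intro x hx; rw [hm]; exact hx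
  · exact Or.inl (hperm.mem_iff.mpr (List.mem_cons.mpr (Or.inl rfl)))

-- generic facts for a step that pops a matching open j against a close at s
lemma pvCasePop (st st₁ : PvSt) (s j : Int) (o : Char)
    (hperm : (pairsOf st).Perm ((j, o) :: pairsOf st₁))
    (hm : st₁.m = (st.m.add j).add s)
    (hfr : ∀ x ∈ pvPos st, x < s) (hfrm : ∀ x ∈ st.m, x < s)
    (hnd : (pvPos st).Nodup) (hdj : ∀ x ∈ pvPos st, x ∉ st.m) :
    (∀ x ∈ pvPos st₁, x < s + 1) ∧ (∀ x ∈ st₁.m, x < s + 1) ∧ (pvPos st₁).Nodup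
    ∧ (∀ x ∈ pvPos st₁, x ∉ st₁.m)
    ∧ (∀ q ∈ pairsOf st₁, q ∈ pairsOf st)
    ∧ (∀ q ∈ pairsOf st, q ∈ pairsOf st₁ ∨ q.1 ∈ st₁.m)
    ∧ (∀ x ∈ st.m, x ∈ st₁.m)
    ∧ (s ∈ st₁.m) := by
  have hpos : (pvPos st).Perm (j :: pvPos st₁) := by
    have := hperm.map Prod.fst
    simpa [pvPos] using this
  have hmem : ∀ x, x ∈ pvPos st₁ → x ∈ pvPos st := by
    intro x hx; exact hpos.mem_iff.mpr (List.mem_cons.mpr (Or.inr hx))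
  have hjpos : j ∈ pvPos st := hpos.mem_iff.mpr (List.mem_cons.mpr (Or.inl rfl))
  have hnd₁ : (j :: pvPos st₁).Nodup := hpos.nodup_iff.mp hnd
  have hjn : j ∉ pvPos st₁ := (List.nodup_cons.mp hnd₁).1
  have hmmem : ∀ x, x ∈ st₁.m ↔ x ∈ st.m ∨ x = j ∨ x = s := by
    intro x
    rw [hm, PySem.Set.mem_add, PySem.Set.mem_add]
    tauto
  refine ⟨?_, ?_, ?_, ?_, ?_, ?_, ?_, ?_⟩
  · intro x hx; have := hfr x (hmem x hx); omega
  · intro x hx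
    rcases (hmmem x).mp hx with h | h | h
    · have := hfrm x h; omega
    · have := hfr j hjpos; omega
    · omega
  · exact (List.nodup_cons.mp hnd₁).2
  · intro x hx hxm
    rcases (hmmem x).mp hxm with h | h | h
    · exact hdj x (hmem x hx) h
    · exact hjn (h ▸ hx)
    · have := hfr x (hmem x hx); omega
  · intro q hq; exact hperm.mem_iff.mpr (List.mem_cons.mpr (Or.inr hq))
  · intro q hq
    rcases List.mem_cons.mp (hperm.mem_iff.mp hq) with h | h
    · exact Or.inr ((hmmem q.1).mpr (Or.inr (Or.inl (by rw [h]))))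
    · exact Or.inl h
  · intro x hx; exact (hmmem x).mpr (Or.inl hx)
  · exact (hmmem s).mpr (Or.inr (Or.inr rfl))

lemma pvPermIns1 {α : Type} (X P A L B : List α) (q : α) :
    (X ++ (P ++ [q]) ++ A ++ L ++ B).Perm (q :: (X ++ P ++ A ++ L ++ B)) := by
  have h1 : X ++ (P ++ [q]) ++ A ++ L ++ B = (X ++ P) ++ q :: (A ++ L ++ B) := by
    simp [List.append_assoc]
  have h2 : q :: (X ++ P ++ A ++ L ++ B) = q :: ((X ++ P) ++ (A ++ L ++ B)) := by
    simp [List.append_assoc]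
  rw [h1, h2]; exact List.perm_middle

lemma pvPermIns2 {α : Type} (X P A L B : List α) (q : α) :
    (X ++ P ++ (A ++ [q]) ++ L ++ B).Perm (q :: (X ++ P ++ A ++ L ++ B)) := by
  have h1 : X ++ P ++ (A ++ [q]) ++ L ++ B = (X ++ P ++ A) ++ q :: (L ++ B) := by
    simp [List.append_assoc]
  have h2 : q :: (X ++ P ++ A ++ L ++ B) = q :: ((X ++ P ++ A) ++ (L ++ B)) := by
    simp [List.append_assoc]
  rw [h1, h2]; exact List.perm_middle

lemma pvPermIns3 {α : Type} (X P A L B : List α) (q : α) :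
    (X ++ P ++ A ++ (L ++ [q]) ++ B).Perm (q :: (X ++ P ++ A ++ L ++ B)) := by
  have h1 : X ++ P ++ A ++ (L ++ [q]) ++ B = (X ++ P ++ A ++ L) ++ q :: B := by
    simp [List.append_assoc]
  have h2 : q :: (X ++ P ++ A ++ L ++ B) = q :: ((X ++ P ++ A ++ L) ++ B) := by
    simp [List.append_assoc]
  rw [h1, h2]; exact List.perm_middle

lemma pvPermIns4 {α : Type} (X P A L B : List α) (q : α) :
    (X ++ P ++ A ++ L ++ (B ++ [q])).Perm (q :: (X ++ P ++ A ++ L ++ B)) := by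
  have h1 : X ++ P ++ A ++ L ++ (B ++ [q]) = (X ++ P ++ A ++ L ++ B) ++ q :: [] := by
    simp [List.append_assoc]
  have h2 : q :: (X ++ P ++ A ++ L ++ B) = q :: ((X ++ P ++ A ++ L ++ B) ++ []) := by
    simp
  rw [h1, h2]; exact List.perm_middle

lemma pvPermIns0 {α : Type} (X P A L B : List α) (q : α) :
    ((X ++ [q]) ++ P ++ A ++ L ++ B).Perm (q :: (X ++ P ++ A ++ L ++ B)) := by
  have h1 : (X ++ [q]) ++ P ++ A ++ L ++ B = X ++ q :: (P ++ A ++ L ++ B) := by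
    simp [List.append_assoc]
  have h2 : q :: (X ++ P ++ A ++ L ++ B) = q :: (X ++ (P ++ A ++ L ++ B)) := by
    simp [List.append_assoc]
  rw [h1, h2]; exact List.perm_middle

lemma pvStep_facts (st : PvSt) (s : Int) (c : Char)
    (hfr : ∀ x ∈ pvPos st, x < s) (hfrm : ∀ x ∈ st.m, x < s)
    (hnd : (pvPos st).Nodup) (hdj : ∀ x ∈ pvPos st, x ∉ st.m) :
    (∀ x ∈ pvPos (pvStep st s c), x < s + 1) ∧ (∀ x ∈ (pvStep st s c).m, x < s + 1)
    ∧ (pvPos (pvStep st s c)).Nodup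
    ∧ (∀ x ∈ pvPos (pvStep st s c), x ∉ (pvStep st s c).m)
    ∧ (∀ q ∈ pairsOf (pvStep st s c), q ∈ pairsOf st ∨ (q = (s, c) ∧ pvIsBr c))
    ∧ (∀ q ∈ pairsOf st, q ∈ pairsOf (pvStep st s c) ∨ q.1 ∈ (pvStep st s c).m)
    ∧ (∀ x ∈ st.m, x ∈ (pvStep st s c).m)
    ∧ (pvIsBr c → ((s, c) ∈ pairsOf (pvStep st s c) ∨ s ∈ (pvStep st s c).m)) := by
  by_cases h1 : c = '('
  · subst h1
    have hst : pvStep st s '(' = { st with p := st.p ++ [s] } := by simp [pvStep]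
    have hperm : (pairsOf (pvStep st s '(')).Perm ((s, '(') :: pairsOf st) := by
      rw [hst, show pairsOf { st with p := st.p ++ [s] }
          = st.em
            ++ (st.p.map (fun i => (i, '(')) ++ [(s, '(')])
            ++ st.a.map (fun i => (i, '<'))
            ++ st.l.map (fun i => (i, '['))
            ++ st.b.map (fun i => (i, '{')) from by simp [pairsOf],
        show pairsOf st = st.em
            ++ st.p.map (fun i => (i, '('))
            ++ st.a.map (fun i => (i, '<'))
            ++ st.l.map (fun i => (i, '['))
            ++ st.b.map (fun i => (i, '{')) from rfl]
      exact pvPermIns1 _ _ _ _ _ _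
    obtain ⟨c1, c2, c3, c4, c5, c6, c7, c8⟩ :=
      pvCaseAdd st (pvStep st s '(') s '(' hperm (by rw [hst]) (by simp [pvIsBr]) hfr hfrm hnd hdj
    exact ⟨c1, c2, c3, c4, c5, c6, c7, fun _ => c8⟩
  by_cases h2 : c = '['
  · subst h2
    have hst : pvStep st s '[' = { st with l := st.l ++ [s] } := by simp [pvStep]
    have hperm : (pairsOf (pvStep st s '[')).Perm ((s, '[') :: pairsOf st) := by
      rw [hst, show pairsOf { st with l := st.l ++ [s] }
          = st.em
            ++ st.p.map (fun i => (i, '('))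
            ++ st.a.map (fun i => (i, '<'))
            ++ (st.l.map (fun i => (i, '[')) ++ [(s, '[')])
            ++ st.b.map (fun i => (i, '{')) from by simp [pairsOf],
        show pairsOf st = st.em
            ++ st.p.map (fun i => (i, '('))
            ++ st.a.map (fun i => (i, '<'))
            ++ st.l.map (fun i => (i, '['))
            ++ st.b.map (fun i => (i, '{')) from rfl]
      exact pvPermIns3 _ _ _ _ _ _
    obtain ⟨c1, c2, c3, c4, c5, c6, c7, c8⟩ :=
      pvCaseAdd st (pvStep st s '[') s '[' hperm (by rw [hst]) (by simp [pvIsBr]) hfr hfrm hnd hdj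
    exact ⟨c1, c2, c3, c4, c5, c6, c7, fun _ => c8⟩
  by_cases h3 : c = '{'
  · subst h3
    have hst : pvStep st s '{' = { st with b := st.b ++ [s] } := by simp [pvStep]
    have hperm : (pairsOf (pvStep st s '{')).Perm ((s, '{') :: pairsOf st) := by
      rw [hst, show pairsOf { st with b := st.b ++ [s] }
          = st.em
            ++ st.p.map (fun i => (i, '('))
            ++ st.a.map (fun i => (i, '<'))
            ++ st.l.map (fun i => (i, '['))
            ++ (st.b.map (fun i => (i, '{')) ++ [(s, '{')]) from by simp [pairsOf],
        show pairsOf st = st.em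
            ++ st.p.map (fun i => (i, '('))
            ++ st.a.map (fun i => (i, '<'))
            ++ st.l.map (fun i => (i, '['))
            ++ st.b.map (fun i => (i, '{')) from rfl]
      exact pvPermIns4 _ _ _ _ _ _
    obtain ⟨c1, c2, c3, c4, c5, c6, c7, c8⟩ :=
      pvCaseAdd st (pvStep st s '{') s '{' hperm (by rw [hst]) (by simp [pvIsBr]) hfr hfrm hnd hdj
    exact ⟨c1, c2, c3, c4, c5, c6, c7, fun _ => c8⟩
  by_cases h4 : c = '<'
  · subst h4
    have hst : pvStep st s '<' = { st with a := st.a ++ [s] } := by simp [pvStep]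
    have hperm : (pairsOf (pvStep st s '<')).Perm ((s, '<') :: pairsOf st) := by
      rw [hst, show pairsOf { st with a := st.a ++ [s] }
          = st.em
            ++ st.p.map (fun i => (i, '('))
            ++ (st.a.map (fun i => (i, '<')) ++ [(s, '<')])
            ++ st.l.map (fun i => (i, '['))
            ++ st.b.map (fun i => (i, '{')) from by simp [pairsOf],
        show pairsOf st = st.em
            ++ st.p.map (fun i => (i, '('))
            ++ st.a.map (fun i => (i, '<'))
            ++ st.l.map (fun i => (i, '['))
            ++ st.b.map (fun i => (i, '{')) from rfl]
      exact pvPermIns2 _ _ _ _ _ _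
    obtain ⟨c1, c2, c3, c4, c5, c6, c7, c8⟩ :=
      pvCaseAdd st (pvStep st s '<') s '<' hperm (by rw [hst]) (by simp [pvIsBr]) hfr hfrm hnd hdj
    exact ⟨c1, c2, c3, c4, c5, c6, c7, fun _ => c8⟩
  by_cases h5 : c = ')'
  · subst h5
    cases hp : st.p.getLast? with
    | none =>
      have hst : pvStep st s ')' = { st with em := st.em ++ [(s, ')')] } := by
        simp [pvStep, hp]
      have hperm : (pairsOf (pvStep st s ')')).Perm ((s, ')') :: pairsOf st) := by
        rw [hst, show pairsOf { st with em := st.em ++ [(s, ')')] }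
            = (st.em ++ [(s, ')')])
            ++ st.p.map (fun i => (i, '('))
            ++ st.a.map (fun i => (i, '<'))
            ++ st.l.map (fun i => (i, '['))
            ++ st.b.map (fun i => (i, '{')) from by simp [pairsOf],
          show pairsOf st = st.em
            ++ st.p.map (fun i => (i, '('))
            ++ st.a.map (fun i => (i, '<'))
            ++ st.l.map (fun i => (i, '['))
            ++ st.b.map (fun i => (i, '{')) from rfl]
        exact pvPermIns0 _ _ _ _ _ _
      obtain ⟨c1, c2, c3, c4, c5, c6, c7, c8⟩ :=
        pvCaseAdd st (pvStep st s ')') s ')' hperm (by rw [hst]) (by simp [pvIsBr]) hfr hfrm hnd hdj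
      exact ⟨c1, c2, c3, c4, c5, c6, c7, fun _ => c8⟩
    | some j =>
      obtain ⟨t, ht⟩ := List.getLast?_eq_some_iff.mp hp
      have hst : pvStep st s ')' = { st with p := st.p.dropLast, m := (st.m.add j).add s } := by
        simp [pvStep, hp]
      have hd : st.p.dropLast = t := by rw [ht]; exact List.dropLast_concat
      have hperm : (pairsOf st).Perm ((j, '(') :: pairsOf (pvStep st s ')')) := by
        rw [hst, show pairsOf { st with p := st.p.dropLast, m := (st.m.add j).add s }
            = st.em
            ++ t.map (fun i => (i, '('))
            ++ st.a.map (fun i => (i, '<'))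
            ++ st.l.map (fun i => (i, '['))
            ++ st.b.map (fun i => (i, '{')) from by simp [pairsOf, hd],
          show pairsOf st = st.em
            ++ ((t.map (fun i => (i, '('))) ++ [(j, '(')])
            ++ st.a.map (fun i => (i, '<'))
            ++ st.l.map (fun i => (i, '['))
            ++ st.b.map (fun i => (i, '{')) from by
            simp [pairsOf, ht],
          ]
        exact pvPermIns1 _ _ _ _ _ _
      obtain ⟨c1, c2, c3, c4, c5, c6, c7, c8⟩ :=
        pvCasePop st (pvStep st s ')') s j '(' hperm (by rw [hst]) hfr hfrm hnd hdj
      exact ⟨c1, c2, c3, c4, fun q hq => Or.inl (c5 q hq), c6, c7, fun _ => Or.inr c8⟩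
  by_cases h6 : c = ']'
  · subst h6
    cases hp : st.l.getLast? with
    | none =>
      have hst : pvStep st s ']' = { st with em := st.em ++ [(s, ']')] } := by
        simp [pvStep, hp]
      have hperm : (pairsOf (pvStep st s ']')).Perm ((s, ']') :: pairsOf st) := by
        rw [hst, show pairsOf { st with em := st.em ++ [(s, ']')] }
            = (st.em ++ [(s, ']')])
            ++ st.p.map (fun i => (i, '('))
            ++ st.a.map (fun i => (i, '<'))
            ++ st.l.map (fun i => (i, '['))
            ++ st.b.map (fun i => (i, '{')) from by simp [pairsOf],
          show pairsOf st = st.em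
            ++ st.p.map (fun i => (i, '('))
            ++ st.a.map (fun i => (i, '<'))
            ++ st.l.map (fun i => (i, '['))
            ++ st.b.map (fun i => (i, '{')) from rfl]
        exact pvPermIns0 _ _ _ _ _ _
      obtain ⟨c1, c2, c3, c4, c5, c6, c7, c8⟩ :=
        pvCaseAdd st (pvStep st s ']') s ']' hperm (by rw [hst]) (by simp [pvIsBr]) hfr hfrm hnd hdj
      exact ⟨c1, c2, c3, c4, c5, c6, c7, fun _ => c8⟩
    | some j =>
      obtain ⟨t, ht⟩ := List.getLast?_eq_some_iff.mp hp
      have hst : pvStep st s ']' = { st with l := st.l.dropLast, m := (st.m.add j).add s } := by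
        simp [pvStep, hp]
      have hd : st.l.dropLast = t := by rw [ht]; exact List.dropLast_concat
      have hperm : (pairsOf st).Perm ((j, '[') :: pairsOf (pvStep st s ']')) := by
        rw [hst, show pairsOf { st with l := st.l.dropLast, m := (st.m.add j).add s }
            = st.em
            ++ st.p.map (fun i => (i, '('))
            ++ st.a.map (fun i => (i, '<'))
            ++ t.map (fun i => (i, '['))
            ++ st.b.map (fun i => (i, '{')) from by simp [pairsOf, hd],
          show pairsOf st = st.em
            ++ st.p.map (fun i => (i, '('))
            ++ st.a.map (fun i => (i, '<'))
            ++ ((t.map (fun i => (i, '['))) ++ [(j, '[')])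
            ++ st.b.map (fun i => (i, '{')) from by
            simp [pairsOf, ht],
          ]
        exact pvPermIns3 _ _ _ _ _ _
      obtain ⟨c1, c2, c3, c4, c5, c6, c7, c8⟩ :=
        pvCasePop st (pvStep st s ']') s j '[' hperm (by rw [hst]) hfr hfrm hnd hdj
      exact ⟨c1, c2, c3, c4, fun q hq => Or.inl (c5 q hq), c6, c7, fun _ => Or.inr c8⟩
  by_cases h7 : c = '}'
  · subst h7
    cases hp : st.b.getLast? with
    | none =>
      have hst : pvStep st s '}' = { st with em := st.em ++ [(s, '}')] } := by
        simp [pvStep, hp]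
      have hperm : (pairsOf (pvStep st s '}')).Perm ((s, '}') :: pairsOf st) := by
        rw [hst, show pairsOf { st with em := st.em ++ [(s, '}')] }
            = (st.em ++ [(s, '}')])
            ++ st.p.map (fun i => (i, '('))
            ++ st.a.map (fun i => (i, '<'))
            ++ st.l.map (fun i => (i, '['))
            ++ st.b.map (fun i => (i, '{')) from by simp [pairsOf],
          show pairsOf st = st.em
            ++ st.p.map (fun i => (i, '('))
            ++ st.a.map (fun i => (i, '<'))
            ++ st.l.map (fun i => (i, '['))
            ++ st.b.map (fun i => (i, '{')) from rfl]
        exact pvPermIns0 _ _ _ _ _ _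
      obtain ⟨c1, c2, c3, c4, c5, c6, c7, c8⟩ :=
        pvCaseAdd st (pvStep st s '}') s '}' hperm (by rw [hst]) (by simp [pvIsBr]) hfr hfrm hnd hdj
      exact ⟨c1, c2, c3, c4, c5, c6, c7, fun _ => c8⟩
    | some j =>
      obtain ⟨t, ht⟩ := List.getLast?_eq_some_iff.mp hp
      have hst : pvStep st s '}' = { st with b := st.b.dropLast, m := (st.m.add j).add s } := by
        simp [pvStep, hp]
      have hd : st.b.dropLast = t := by rw [ht]; exact List.dropLast_concat
      have hperm : (pairsOf st).Perm ((j, '{') :: pairsOf (pvStep st s '}')) := by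
        rw [hst, show pairsOf { st with b := st.b.dropLast, m := (st.m.add j).add s }
            = st.em
            ++ st.p.map (fun i => (i, '('))
            ++ st.a.map (fun i => (i, '<'))
            ++ st.l.map (fun i => (i, '['))
            ++ t.map (fun i => (i, '{')) from by simp [pairsOf, hd],
          show pairsOf st = st.em
            ++ st.p.map (fun i => (i, '('))
            ++ st.a.map (fun i => (i, '<'))
            ++ st.l.map (fun i => (i, '['))
            ++ ((t.map (fun i => (i, '{'))) ++ [(j, '{')]) from by
            simp [pairsOf, ht],
          ]
        exact pvPermIns4 _ _ _ _ _ _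
      obtain ⟨c1, c2, c3, c4, c5, c6, c7, c8⟩ :=
        pvCasePop st (pvStep st s '}') s j '{' hperm (by rw [hst]) hfr hfrm hnd hdj
      exact ⟨c1, c2, c3, c4, fun q hq => Or.inl (c5 q hq), c6, c7, fun _ => Or.inr c8⟩
  by_cases h8 : c = '>'
  · subst h8
    cases hp : st.a.getLast? with
    | none =>
      have hst : pvStep st s '>' = { st with em := st.em ++ [(s, '>')] } := by
        simp [pvStep, hp]
      have hperm : (pairsOf (pvStep st s '>')).Perm ((s, '>') :: pairsOf st) := by
        rw [hst, show pairsOf { st with em := st.em ++ [(s, '>')] }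
            = (st.em ++ [(s, '>')])
            ++ st.p.map (fun i => (i, '('))
            ++ st.a.map (fun i => (i, '<'))
            ++ st.l.map (fun i => (i, '['))
            ++ st.b.map (fun i => (i, '{')) from by simp [pairsOf],
          show pairsOf st = st.em
            ++ st.p.map (fun i => (i, '('))
            ++ st.a.map (fun i => (i, '<'))
            ++ st.l.map (fun i => (i, '['))
            ++ st.b.map (fun i => (i, '{')) from rfl]
        exact pvPermIns0 _ _ _ _ _ _
      obtain ⟨c1, c2, c3, c4, c5, c6, c7, c8⟩ :=
        pvCaseAdd st (pvStep st s '>') s '>' hperm (by rw [hst]) (by simp [pvIsBr]) hfr hfrm hnd hdj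
      exact ⟨c1, c2, c3, c4, c5, c6, c7, fun _ => c8⟩
    | some j =>
      obtain ⟨t, ht⟩ := List.getLast?_eq_some_iff.mp hp
      have hst : pvStep st s '>' = { st with a := st.a.dropLast, m := (st.m.add j).add s } := by
        simp [pvStep, hp]
      have hd : st.a.dropLast = t := by rw [ht]; exact List.dropLast_concat
      have hperm : (pairsOf st).Perm ((j, '<') :: pairsOf (pvStep st s '>')) := by
        rw [hst, show pairsOf { st with a := st.a.dropLast, m := (st.m.add j).add s }
            = st.em
            ++ st.p.map (fun i => (i, '('))
            ++ t.map (fun i => (i, '<'))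
            ++ st.l.map (fun i => (i, '['))
            ++ st.b.map (fun i => (i, '{')) from by simp [pairsOf, hd],
          show pairsOf st = st.em
            ++ st.p.map (fun i => (i, '('))
            ++ ((t.map (fun i => (i, '<'))) ++ [(j, '<')])
            ++ st.l.map (fun i => (i, '['))
            ++ st.b.map (fun i => (i, '{')) from by
            simp [pairsOf, ht],
          ]
        exact pvPermIns2 _ _ _ _ _ _
      obtain ⟨c1, c2, c3, c4, c5, c6, c7, c8⟩ :=
        pvCasePop st (pvStep st s '>') s j '<' hperm (by rw [hst]) hfr hfrm hnd hdj
      exact ⟨c1, c2, c3, c4, fun q hq => Or.inl (c5 q hq), c6, c7, fun _ => Or.inr c8⟩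
  have hst : pvStep st s c = st := by
    simp [pvStep, h1, h2, h3, h4, h5, h6, h7, h8]
  rw [hst]
  refine ⟨fun x hx => by have := hfr x hx; omega, fun x hx => by have := hfrm x hx; omega,
    hnd, hdj, fun q hq => Or.inl hq, fun q hq => Or.inl hq, fun x hx => hx, fun hbr => ?_⟩
  exfalso
  simp [pvIsBr] at hbr
  tauto

lemma pvScan_main (cs : List Char) (s : Int) (st : PvSt)
    (hfr : ∀ x ∈ pvPos st, x < s) (hfrm : ∀ x ∈ st.m, x < s)
    (hnd : (pvPos st).Nodup) (hdj : ∀ x ∈ pvPos st, x ∉ st.m) :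
    (pvPos (pvScan (PySem.List.enumerate cs s) st)).Nodup
    ∧ (∀ x ∈ pvPos (pvScan (PySem.List.enumerate cs s) st), x ∉ (pvScan (PySem.List.enumerate cs s) st).m)
    ∧ (∀ q ∈ pairsOf (pvScan (PySem.List.enumerate cs s) st),
        q ∈ pairsOf st ∨ (q ∈ PySem.List.enumerate cs s ∧ pvIsBr q.2))
    ∧ (∀ i c, (i, c) ∈ PySem.List.enumerate cs s → pvIsBr c →
        ((i, c) ∈ pairsOf (pvScan (PySem.List.enumerate cs s) st) ∨ i ∈ (pvScan (PySem.List.enumerate cs s) st).m))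
    ∧ (∀ q ∈ pairsOf st, q ∈ pairsOf (pvScan (PySem.List.enumerate cs s) st) ∨ q.1 ∈ (pvScan (PySem.List.enumerate cs s) st).m)
    ∧ (∀ x ∈ st.m, x ∈ (pvScan (PySem.List.enumerate cs s) st).m) := by
  induction cs generalizing s st with
  | nil =>
    simp only [PySem.List.enumerate, pvScan]
    exact ⟨hnd, hdj, fun q hq => Or.inl hq, by simp, fun q hq => Or.inl hq, fun x hx => hx⟩
  | cons c cs ih =>
    rw [PySem.List.enumerate_cons]
    simp only [pvScan]
    obtain ⟨s1, s2, s3, s4, s5, s6, s7, s8⟩ := pvStep_facts st s c hfr hfrm hnd hdj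
    obtain ⟨i1, i2, i3, i4, i5, i6⟩ := ih (s + 1) (pvStep st s c) s1 s2 s3 s4
    refine ⟨i1, i2, ?_, ?_, ?_, ?_⟩
    · intro q hq
      rcases i3 q hq with h | h
      · rcases s5 q h with h' | h'
        · exact Or.inl h'
        · exact Or.inr ⟨List.mem_cons.mpr (Or.inl h'.1),
            by rw [show q.2 = c from by rw [h'.1]]; exact h'.2⟩
      · exact Or.inr ⟨List.mem_cons.mpr (Or.inr h.1), h.2⟩
    · intro i c' hin hbr
      rcases List.mem_cons.mp hin with heq | htl
      · obtain ⟨hi, hc⟩ : i = s ∧ c' = c := by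
          have h' := heq
          rw [Prod.mk.injEq] at h'
          exact h'
        rw [hc] at hbr
        rw [hi, hc]
        rcases s8 hbr with h | h
        · exact i5 (s, c) h
        · exact Or.inr (i6 s h)
      · exact i4 i c' htl hbr
    · intro q hq
      rcases s6 q hq with h | h
      · exact i5 q h
      · exact Or.inr (i6 q.1 h)
    · intro x hx
      exact i6 x (s7 x hx)

lemma pvA_eq (struc : String) (shift : Int) :
    listIntermolNodes struc shift
      = PySem.List.sorted2 ((pairsOf (pvScan (PySem.List.enumerate struc.toList 1) pvSt0)).map (pvF shift))
          (fun x => x.1) (fun x => x.2) := by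
  simp only [listIntermolNodes]
  rw [show ((([] : List (Int × String)),
      (⟨[('(', []), ('<', []), ('[', []), ('{', [])]⟩ : PySem.Dict Char (List (Int × String))))
      = pvRepA shift pvSt0) from rfl]
  rw [pvFoldA_rep]
  congr 1
  generalize pvScan (PySem.List.enumerate struc.toList 1) pvSt0 = st
  simp [pvRepA, pairsOf, pvF, PySem.Dict.values, List.map_map, Function.comp_def,
    List.append_assoc]

lemma pvB_eq (struc : String) (shift : Int) :
    listIntermolNodes_alt struc shift
      = (PySem.List.enumerate struc.toList 1).filterMap (fun ic =>
          if pvBrackets.contains ic.2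
              && !((pvScan (PySem.List.enumerate struc.toList 1) pvSt0).m.contains ic.1) then
            some (pvF shift ic)
          else none) := by
  simp only [listIntermolNodes_alt]
  rw [show (((⟨[('(', []), ('[', []), ('{', []), ('<', [])]⟩ : PySem.Dict Char (List Int)),
      PySem.Set.ofList ([] : List Int)) = pvRepB pvSt0) from rfl]
  rw [pvFoldB_rep]
  rfl

-- elements of the B-side filter pass have strictly increasing first components
lemma pvFilter_lb (cs : List Char) (s shift : Int) (P : Int × Char → Bool) :
    ∀ q ∈ (PySem.List.enumerate cs s).filterMap (fun ic => if P ic then some (pvF shift ic) else none),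
      s + shift ≤ q.1 := by
  induction cs generalizing s with
  | nil => intro q hq; simp [PySem.List.enumerate] at hq
  | cons c cs ih =>
    intro q hq
    rw [PySem.List.enumerate_cons, List.filterMap_cons] at hq
    cases hP : P (s, c) with
    | false =>
      rw [hP] at hq
      simp only [Bool.false_eq_true, if_false] at hq
      have := ih (s + 1) q hq
      omega
    | true =>
      rw [hP] at hq
      simp only [if_true] at hq
      rcases List.mem_cons.mp hq with h1 | h1
      · rw [h1]; simp [pvF]
      · have := ih (s + 1) q h1; omega

lemma pvFilter_pairwise (cs : List Char) (s shift : Int) (P : Int × Char → Bool) :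
    ((PySem.List.enumerate cs s).filterMap (fun ic => if P ic then some (pvF shift ic) else none)).Pairwise
      (fun x y => x.1 < y.1) := by
  induction cs generalizing s with
  | nil => simp [PySem.List.enumerate]
  | cons c cs ih =>
    rw [PySem.List.enumerate_cons, List.filterMap_cons]
    cases hP : P (s, c) with
    | false =>
      simp only [Bool.false_eq_true, if_false]
      exact ih (s + 1)
    | true =>
      simp only [if_true]
      refine List.pairwise_cons.mpr ⟨?_, ih (s + 1)⟩
      intro q hq
      have := pvFilter_lb cs (s + 1) shift P q hq
      simp only [pvF]
      omega

-- sorted2 coincides with sorted on the first key when first keys are distinct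
lemma pvInsertBy_congr {α : Type} (f g : α → α → Bool) (x : α) (acc : List α)
    (h : ∀ y ∈ acc, f x y = g x y) :
    PySem.List.insertBy f x acc = PySem.List.insertBy g x acc := by
  induction acc with
  | nil => rfl
  | cons y ys ih =>
    have hy := h y (by simp)
    simp only [PySem.List.insertBy]
    rw [hy]
    by_cases hg : g x y = true
    · simp [hg]
    · simp only [Bool.not_eq_true] at hg
      simp [hg, ih (fun z hz => h z (by simp [hz]))]

lemma pvFoldIns_congr {α : Type} (f g : α → α → Bool) (xs acc : List α)
    (h : ∀ a b, (a ∈ xs ∨ a ∈ acc) → (b ∈ xs ∨ b ∈ acc) → f a b = g a b) :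
    xs.foldl (fun ac x => PySem.List.insertBy f x ac) acc
      = xs.foldl (fun ac x => PySem.List.insertBy g x ac) acc := by
  induction xs generalizing acc with
  | nil => rfl
  | cons x xs ih =>
    simp only [List.foldl_cons]
    rw [pvInsertBy_congr f g x acc (fun y hy => h x y (Or.inl (by simp)) (Or.inr hy))]
    apply ih
    intro a b ha hb
    apply h a b
    · rcases ha with ha | ha
      · exact Or.inl (by simp [ha])
      · rcases (PySem.List.mem_insertBy _ _ _ _).mp ha with h' | h'
        · exact Or.inl (by simp [h'])
        · exact Or.inr h'
    · rcases hb with hb | hb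
      · exact Or.inl (by simp [hb])
      · rcases (PySem.List.mem_insertBy _ _ _ _).mp hb with h' | h'
        · exact Or.inl (by simp [h'])
        · exact Or.inr h'

lemma pvSorted2_eq_sorted (xs : List (Int × String))
    (h : (xs.map Prod.fst).Nodup) :
    PySem.List.sorted2 xs (fun x => x.1) (fun x => x.2)
      = PySem.List.sorted xs (fun x => x.1) := by
  have hinj : ∀ a ∈ xs, ∀ b ∈ xs, a.1 = b.1 → a = b := by
    intro a ha b hb hab
    exact List.inj_on_of_nodup_map h ha hb hab
  rw [PySem.List.sorted_eq_foldl_insertBy]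
  refine pvFoldIns_congr
    (fun a b => decide (a.1 < b.1) || (!decide (b.1 < a.1) && decide (a.2 < b.2)))
    (fun a b => decide (a.1 < b.1)) xs [] ?_
  intro a b ha hb
  have ha' : a ∈ xs := by simpa using ha
  have hb' : b ∈ xs := by simpa using hb
  rcases lt_trichotomy a.1 b.1 with hlt | heq | hgt
  · simp [hlt, asymm hlt]
  · have hab : a = b := hinj a ha' b hb' heq
    subst hab
    simp
  · simp [hgt, not_lt_of_gt hgt]

-- ===== VERDICT (by name: the statement is the Claim_ definition above) =====
theorem listIntermolNodes_spec : Claim_equal_listIntermolNodes := by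
  intro struc shift _
  unfold Spec_listIntermolNodes
  rw [pvA_eq, pvB_eq]
  have h0fr : ∀ x ∈ pvPos pvSt0, x < (1 : Int) := by
    intro x hx; simp [pvPos, pairsOf, pvSt0] at hx
  have h0frm : ∀ x ∈ pvSt0.m, x < (1 : Int) := by
    intro x hx; simp [pvSt0] at hx
  have h0nd : (pvPos pvSt0).Nodup := by simp [pvPos, pairsOf, pvSt0]
  have h0dj : ∀ x ∈ pvPos pvSt0, x ∉ pvSt0.m := by
    intro x hx; simp [pvPos, pairsOf, pvSt0] at hx
  obtain ⟨hnd, hdj, hC, hD, _, _⟩ := pvScan_main struc.toList 1 pvSt0 h0fr h0frm h0nd h0dj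
  set st' := pvScan (PySem.List.enumerate struc.toList 1) pvSt0 with hst'
  have hndF : (((pairsOf st').map (pvF shift)).map Prod.fst).Nodup := by
    rw [List.map_map]
    have he : (Prod.fst ∘ pvF shift) = (fun x : Int => x + shift) ∘ Prod.fst := rfl
    rw [he, ← List.map_map]
    exact List.Nodup.map (fun a b hab => by omega) hnd
  have hndA : ((pairsOf st').map (pvF shift)).Nodup := hndF.of_map
  have hpw := pvFilter_pairwise struc.toList 1 shift
    (fun ic => pvBrackets.contains ic.2 && !(st'.m.contains ic.1))
  have hndB : ((PySem.List.enumerate struc.toList 1).filterMap (fun ic =>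
      if pvBrackets.contains ic.2 && !(st'.m.contains ic.1) then some (pvF shift ic)
      else none)).Nodup :=
    List.Pairwise.imp (fun {x y} hxy he => by rw [he] at hxy; exact lt_irrefl _ hxy) hpw
  have hmem : ∀ y, y ∈ (PySem.List.enumerate struc.toList 1).filterMap (fun ic =>
      if pvBrackets.contains ic.2 && !(st'.m.contains ic.1) then some (pvF shift ic)
      else none) ↔ y ∈ (pairsOf st').map (pvF shift) := by
    intro y
    constructor
    · intro hy
      obtain ⟨ic, hicm, hg⟩ := List.mem_filterMap.mp hy
      by_cases hcond : (pvBrackets.contains ic.2 && !(st'.m.contains ic.1)) = true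
      · rw [if_pos hcond] at hg
        rw [Bool.and_eq_true] at hcond
        have hbr : pvIsBr ic.2 := by
          have := hcond.1
          simpa [pvBrackets, pvIsBr] using this
        have hnm : ic.1 ∉ st'.m := by
          have := hcond.2
          simpa using this
        rcases hD ic.1 ic.2 (by simpa using hicm) hbr with h | h
        · exact List.mem_map.mpr ⟨(ic.1, ic.2), h, Option.some.inj hg⟩
        · exact absurd h hnm
      · rw [if_neg hcond] at hg
        exact absurd hg (by simp)
    · intro hy
      obtain ⟨q, hq, hyq⟩ := List.mem_map.mp hy
      rcases hC q hq with h | h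
      · simp [pairsOf, pvSt0] at h
      · obtain ⟨hqE, hqbr⟩ := h
        have hnm : q.1 ∉ st'.m := hdj q.1 (List.mem_map.mpr ⟨q, hq, rfl⟩)
        have hcond : (pvBrackets.contains q.2 && !(st'.m.contains q.1)) = true := by
          rw [Bool.and_eq_true]
          constructor
          · simpa [pvBrackets, pvIsBr] using hqbr
          · simpa using hnm
        refine List.mem_filterMap.mpr ⟨(q.1, q.2), by simpa using hqE, ?_⟩
        rw [if_pos hcond, hyq]
  have hperm := (List.perm_ext_iff_of_nodup hndB hndA).mpr hmem
  rw [pvSorted2_eq_sorted _ hndF]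
  exact PySem.List.sorted_eq_of_perm_of_pairwise_lt _ _ _ hperm hpw
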